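-- pv_equiv track=rewrite | github.com/Iam-El/Random-Problems-Solved | Hackerank/hackerank_maximumtoss_streak.py | getMaxStreaks
-- ===== SOURCE A (Python) =====
-- def getMaxStreaks(toss):
--     # Return an array of two integers containing the maximum streak of heads and tails respectively
--     if toss is None:
--         return [0, 0]
--
--     if len(toss) == 1:
--         if toss[0] == "Heads":
--             return [1, 0]
--         if toss[0] == "Tails":
--             return [0, 1]
--
--     heads = 0
--     tails = 0
--     headCount = 0
--     tailCount = 0
--     prev = None;
--     for i in range(0, len(toss)):
--         if prev is not None and toss[i] == toss[i - 1]: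
--             if toss[i] == 'Heads':
--                 headCount = headCount + 1
--             if toss[i] == 'Tails':
--                 tailCount = tailCount + 1
--         else:
--             if toss[i] == "Heads":
--                 tailCount = 0
--                 headCount = 1
--             if toss[i] == "Tails":
--                 tailCount = 1
--                 headCount = 0
--         if headCount > heads:
--             heads = headCount
--         if tailCount > tails:
--             tails = tailCount
--         prev = toss[i]
--     return [heads, tails]
-- ===== SOURCE B (Python) =====
-- def getMaxStreaks(toss):
--     # Run-decomposition: scan maximal runs of equal values with two indices
--     # and take the longest "Heads" run and the longest "Tails" run.
--     if toss is None:
--         return [0, 0]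
--     heads = 0
--     tails = 0
--     i = 0
--     n = len(toss)
--     while i < n:
--         v = toss[i]
--         j = i + 1
--         while j < n and toss[j] == v:
--             j += 1
--         if v == "Heads":
--             heads = max(heads, j - i)
--         elif v == "Tails":
--             tails = max(tails, j - i)
--         i = j
--     return [heads, tails]
-- ===== Notes on version B (the rewrite author's own statement) =====
-- stated objective: alternative
-- what changed: Replaced the per-element prev/headCount/tailCount state machine (and its length-1 special case) by a run-decomposition: a two-pointer scan over maximal runs of equal values, taking the max run length per value.
import Mathlib
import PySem

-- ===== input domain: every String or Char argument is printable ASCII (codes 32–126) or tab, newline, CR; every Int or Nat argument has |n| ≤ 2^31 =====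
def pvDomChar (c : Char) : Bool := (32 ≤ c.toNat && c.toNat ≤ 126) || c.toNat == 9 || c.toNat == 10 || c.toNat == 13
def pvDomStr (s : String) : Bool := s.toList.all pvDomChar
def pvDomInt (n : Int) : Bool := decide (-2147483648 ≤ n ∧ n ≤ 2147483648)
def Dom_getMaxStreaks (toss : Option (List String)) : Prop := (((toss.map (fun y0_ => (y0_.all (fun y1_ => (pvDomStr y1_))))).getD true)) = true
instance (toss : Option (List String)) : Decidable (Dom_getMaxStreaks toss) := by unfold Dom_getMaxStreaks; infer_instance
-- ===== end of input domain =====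

-- B replaces A's per-element prev/headCount/tailCount state machine (and its length-1 special case)
-- by a run-decomposition: scan maximal runs of equal values, keep the max run length of "Heads" and of "Tails".

-- ===== PORT A =====
-- one iteration of A's for-loop body: state (heads, tails, headCount, tailCount, prev)
def pvStepA (l : List String) (s : Int × Int × Int × Int × Option String) (i : Int) : Int × Int × Int × Int × Option String :=
  let (heads, tails, headCount, tailCount, prev) := s
  let x := (PySem.List.pyGet? l i).getD ""
  let (headCount, tailCount) :=
    if prev.isSome && (PySem.List.pyGet? l i == PySem.List.pyGet? l (i - 1)) then
      (if x == "Heads" then headCount + 1 else headCount,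
       if x == "Tails" then tailCount + 1 else tailCount)
    else
      if x == "Heads" then ((1 : Int), (0 : Int))
      else if x == "Tails" then ((0 : Int), (1 : Int))
      else (headCount, tailCount)
  let heads := if headCount > heads then headCount else heads
  let tails := if tailCount > tails then tailCount else tails
  (heads, tails, headCount, tailCount, PySem.List.pyGet? l i)


def pvLoopA (l : List String) : List Int :=
  let s := (PySem.List.pyRange 0 (PySem.List.len l) 1).foldl (pvStepA l) (0, 0, 0, 0, none)
  [s.1, s.2.1]

def getMaxStreaks (toss : Option (List String)) : List Int :=
  match toss with
  | none => [0, 0]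
  | some l =>
    if l.length == 1 then
      if PySem.List.pyGet? l 0 == some "Heads" then [1, 0]
      else if PySem.List.pyGet? l 0 == some "Tails" then [0, 1]
      else pvLoopA l
    else pvLoopA l

-- ===== PORT B =====
-- B's outer while-loop: each step consumes one maximal run of equal values
def pvGoB : List String → Int → Int → List Int
  | [], heads, tails => [heads, tails]
  | v :: rest, heads, tails =>
    let run : Int := ((rest.takeWhile (· == v)).length : Int) + 1
    let rest' := rest.dropWhile (· == v)
    if v == "Heads" then pvGoB rest' (max heads run) tails
    else if v == "Tails" then pvGoB rest' heads (max tails run)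
    else pvGoB rest' heads tails
termination_by l _ _ => l.length
decreasing_by
  all_goals
    simp only [List.length_cons]
    exact Nat.lt_succ_of_le (List.length_dropWhile_le _ _)


def getMaxStreaks_alt (toss : Option (List String)) : List Int :=
  match toss with
  | none => [0, 0]
  | some l => pvGoB l 0 0

-- ===== PRECONDITION & SPEC =====
def Spec_getMaxStreaks (toss : Option (List String)) (out : List Int) : Prop := out = getMaxStreaks_alt toss
instance (toss : Option (List String)) (out : List Int) : Decidable (Spec_getMaxStreaks toss out) := by unfold Spec_getMaxStreaks; infer_instance

-- ===== CLAIM (what is proved, stated in full; the proofs are below) =====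
def Claim_equal_getMaxStreaks : Prop := ∀ (toss : Option (List String)), Dom_getMaxStreaks toss → Spec_getMaxStreaks toss (getMaxStreaks toss)

-- ===== LEMMAS AND PROOFS =====

-- A's index loop re-expressed as structural recursion over the list, threading prev as a value
def pvAGo : List String → Option String → Int → Int → Int → Int → Int × Int
  | [], _, heads, tails, _, _ => (heads, tails)
  | x :: rest, p, heads, tails, headCount, tailCount =>
    let (headCount, tailCount) :=
      if p == some x then
        (if x == "Heads" then headCount + 1 else headCount,
         if x == "Tails" then tailCount + 1 else tailCount)
      else
        if x == "Heads" then ((1 : Int), (0 : Int))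
        else if x == "Tails" then ((0 : Int), (1 : Int))
        else (headCount, tailCount)
    let heads := if headCount > heads then headCount else heads
    let tails := if tailCount > tails then tailCount else tails
    pvAGo rest (some x) heads tails headCount tailCount


-- A's index fold over pyRange equals pvAGo on the unprocessed suffix
theorem bridgeA : ∀ (rest pre : List String) (h t hc tc : Int),
    (let F := (PySem.List.pyRange (pre.length : Int) ((pre.length : Int) + (rest.length : Int)) 1).foldl
        (pvStepA (pre ++ rest)) (h, t, hc, tc, pre.getLast?)
     (F.1, F.2.1)) = pvAGo rest pre.getLast? h t hc tc := by
  intro rest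
  induction rest with
  | nil =>
    intro pre h t hc tc
    simp only [List.length_nil, Nat.cast_zero, add_zero]
    rw [PySem.List.pyRange_one_eq_nil le_rfl]
    simp [pvAGo]
  | cons x rs ih =>
    intro pre h t hc tc
    simp only [List.length_cons]
    rw [PySem.List.pyRange_one_cons (by push_cast; omega)]
    have hget := PySem.List.pyGet?_append_length pre rs x
    have hcont : (pre.getLast?.isSome &&
        ((some x : Option String) ==
         PySem.List.pyGet? (pre ++ x :: rs) ((pre.length : Int) - 1))) = (pre.getLast? == some x) := by
      rcases List.eq_nil_or_concat pre with hpre | ⟨pre', q, hpre⟩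
      · subst hpre; simp
      · rw [List.concat_eq_append] at hpre
        subst hpre
        have hidx : (((pre' ++ [q]).length : Int)) - 1 = (pre'.length : Int) := by simp
        have hL : (pre' ++ [q]) ++ x :: rs = pre' ++ q :: (x :: rs) := by simp
        have hget' : PySem.List.pyGet? ((pre' ++ [q]) ++ x :: rs) (((pre' ++ [q]).length : Int) - 1) = some q := by
          rw [hidx, hL]; exact PySem.List.pyGet?_append_length pre' (x :: rs) q
        rw [hget', List.getLast?_append]
        simp [eq_comm]
    have hlen1 : (pre.length : Int) + 1 = ((pre ++ [x]).length : Int) := by simp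
    have hlen2 : (pre.length : Int) + (((rs.length + 1 : Nat)) : Int) = ((pre ++ [x]).length : Int) + (rs.length : Int) := by
      push_cast; simp; omega
    have hL2 : pre ++ x :: rs = (pre ++ [x]) ++ rs := by simp
    have hlast : (some x : Option String) = (pre ++ [x]).getLast? := by
      rw [List.getLast?_append]; rfl
    simp only [List.foldl_cons, pvStepA, hget, Option.getD_some, hcont, pvAGo]
    rw [hlen2, hL2, hlen1, hlast]
    exact ih (pre ++ [x]) _ _ _ _

-- processing a maximal run of "Heads" element by element
theorem runHeads : ∀ (rest : List String) (h t c : Int), 1 ≤ c → c ≤ h → 0 ≤ t →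
    pvAGo rest (some "Heads") h t c 0 =
      pvAGo (rest.dropWhile (· == "Heads")) (some "Heads")
        (max h (c + ((rest.takeWhile (· == "Heads")).length : Int))) t
        (c + ((rest.takeWhile (· == "Heads")).length : Int)) 0 := by
  intro rest
  induction rest with
  | nil =>
    intro h t c h1 h2 h3
    simp [pvAGo]
    omega
  | cons y rs ih =>
    intro h t c h1 h2 h3
    by_cases hy : y = "Heads"
    · subst hy
      rw [List.takeWhile_cons_of_pos (by simp), List.dropWhile_cons_of_pos (by simp)]
      simp only [pvAGo, beq_self_eq_true, if_true,
        show (("Heads":String) == "Tails") = false from rfl, Bool.false_eq_true, if_false]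
      rw [if_neg (by omega : ¬ ((0:Int) > t))]
      rw [ih (if c + 1 > h then c + 1 else h) t (c+1) (by omega) (by split_ifs <;> omega) h3]
      have e1 : max (if c + 1 > h then c + 1 else h) (c + 1 + ((rs.takeWhile (· == "Heads")).length : Int))
          = max h (c + (((("Heads":String) :: rs.takeWhile (· == "Heads")).length : Nat) : Int)) := by
        simp; split_ifs <;> omega
      have e2 : c + 1 + ((rs.takeWhile (· == "Heads")).length : Int)
          = c + (((("Heads":String) :: rs.takeWhile (· == "Heads")).length : Nat) : Int) := by
        simp; omega
      rw [e1, e2]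
    · rw [List.takeWhile_cons_of_neg (by simp [hy]), List.dropWhile_cons_of_neg (by simp [hy])]
      simp only [List.length_nil, Nat.cast_zero, add_zero]
      rw [max_eq_left h2]


-- processing a maximal run of "Tails" element by element
theorem runTails : ∀ (rest : List String) (h t c : Int), 1 ≤ c → c ≤ t → 0 ≤ h →
    pvAGo rest (some "Tails") h t 0 c =
      pvAGo (rest.dropWhile (· == "Tails")) (some "Tails") h
        (max t (c + ((rest.takeWhile (· == "Tails")).length : Int)))
        0 (c + ((rest.takeWhile (· == "Tails")).length : Int)) := by
  intro rest
  induction rest with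
  | nil =>
    intro h t c h1 h2 h3
    simp [pvAGo]
    omega
  | cons y rs ih =>
    intro h t c h1 h2 h3
    by_cases hy : y = "Tails"
    · subst hy
      rw [List.takeWhile_cons_of_pos (by simp), List.dropWhile_cons_of_pos (by simp)]
      simp only [pvAGo, beq_self_eq_true, if_true,
        show (("Tails":String) == "Heads") = false from rfl, Bool.false_eq_true, if_false]
      rw [if_neg (by omega : ¬ ((0:Int) > h))]
      rw [ih h (if c + 1 > t then c + 1 else t) (c+1) (by omega) (by split_ifs <;> omega) h3]
      have e1 : max (if c + 1 > t then c + 1 else t) (c + 1 + ((rs.takeWhile (· == "Tails")).length : Int))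
          = max t (c + (((("Tails":String) :: rs.takeWhile (· == "Tails")).length : Nat) : Int)) := by
        simp; split_ifs <;> omega
      have e2 : c + 1 + ((rs.takeWhile (· == "Tails")).length : Int)
          = c + (((("Tails":String) :: rs.takeWhile (· == "Tails")).length : Nat) : Int) := by
        simp; omega
      rw [e1, e2]
    · rw [List.takeWhile_cons_of_neg (by simp [hy]), List.dropWhile_cons_of_neg (by simp [hy])]
      simp only [List.length_nil, Nat.cast_zero, add_zero]
      rw [max_eq_left h2]


-- a run of any other value leaves the whole state unchanged
theorem runOther : ∀ (rest : List String) (v : String) (h t hc tc : Int),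
    (v == "Heads") = false → (v == "Tails") = false → hc ≤ h → tc ≤ t →
    pvAGo rest (some v) h t hc tc = pvAGo (rest.dropWhile (· == v)) (some v) h t hc tc := by
  intro rest
  induction rest with
  | nil => intro v h t hc tc _ _ _ _; simp
  | cons y rs ih =>
    intro v h t hc tc hv1 hv2 hchc hctc
    by_cases hy : y = v
    · subst hy
      rw [List.dropWhile_cons_of_pos (by simp)]
      simp only [pvAGo, beq_self_eq_true, if_true, hv1, hv2, Bool.false_eq_true, if_false]
      rw [if_neg (by omega : ¬ (hc > h)), if_neg (by omega : ¬ (tc > t))]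
      exact ih y h t hc tc hv1 hv2 hchc hctc
    · rw [List.dropWhile_cons_of_neg (by simp [hy])]

theorem head?_dropWhile_beq (v : String) (rest : List String) :
    ∀ q, (rest.dropWhile (· == v)).head? = some q → (q == v) = false := by
  intro q hq
  cases hd : rest.dropWhile (· == v) with
  | nil => simp [hd] at hq
  | cons a l =>
    have hne : rest.dropWhile (· == v) ≠ [] := by simp [hd]
    have := List.head_dropWhile_not (· == v) hne
    rw [List.head?_eq_some_head hne] at hq
    cases hq
    exact this


-- at a run boundary, A's state machine agrees with B's run recursion
theorem mainEq : ∀ (n : Nat) (l : List String) (p : Option String) (h t hc tc : Int),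
    l.length ≤ n → 0 ≤ hc → hc ≤ h → 0 ≤ tc → tc ≤ t →
    (∀ q, p = some q → l.head? ≠ some q) →
    pvGoB l h t = [(pvAGo l p h t hc tc).1, (pvAGo l p h t hc tc).2] := by
  intro n
  induction n with
  | zero =>
    intro l p h t hc tc hlen _ _ _ _ _
    have : l = [] := List.eq_nil_of_length_eq_zero (Nat.le_zero.mp hlen)
    subst this
    simp [pvGoB, pvAGo]
  | succ m ih =>
    intro l p h t hc tc hlen h0hc hhc h0tc htc hp
    cases l with
    | nil => simp [pvGoB, pvAGo]
    | cons x rest =>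
      have hcont : (p == some x) = false := by
        cases p with
        | none => rfl
        | some q =>
          have : x ≠ q := fun e => hp q rfl (by simp [e])
          simp [Ne.symm this]
      have hlen' : (rest.dropWhile (· == x)).length ≤ m := by
        have := List.length_dropWhile_le (· == x) rest
        simp at hlen; omega
      have hhead := head?_dropWhile_beq x rest
      by_cases hx : x = "Heads"
      · subst hx
        simp only [pvAGo, hcont, Bool.false_eq_true, if_false, beq_self_eq_true, if_true]
        rw [if_neg (by omega : ¬ ((0:Int) > t))]
        rw [runHeads rest (if 1 > h then 1 else h) t 1 le_rfl (by split_ifs <;> omega) (by omega)]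
        set k : Int := ((rest.takeWhile (· == "Heads")).length : Int) with hk
        have hk0 : 0 ≤ k := by positivity
        rw [← ih (rest.dropWhile (· == "Heads")) (some "Heads")
            (max (if 1 > h then 1 else h) (1 + k)) t (1 + k) 0 hlen'
            (by omega) (le_max_right _ _) le_rfl (by omega)
            (by intro q hq hhd; cases hq
                exact absurd (hhead _ (by simpa using hhd)) (by simp))]
        simp only [pvGoB, beq_self_eq_true, if_true]
        have : max h (k + 1) = max (if 1 > h then 1 else h) (1 + k) := by split_ifs <;> omega
        rw [this]
      · by_cases hx2 : x = "Tails"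
        · subst hx2
          simp only [pvAGo, hcont, Bool.false_eq_true, if_false, beq_self_eq_true, if_true,
            show (("Tails":String) == "Heads") = false from rfl]
          rw [if_neg (by omega : ¬ ((0:Int) > h))]
          rw [runTails rest h (if 1 > t then 1 else t) 1 le_rfl (by split_ifs <;> omega) (by omega)]
          set k : Int := ((rest.takeWhile (· == "Tails")).length : Int) with hk
          have hk0 : 0 ≤ k := by positivity
          rw [← ih (rest.dropWhile (· == "Tails")) (some "Tails")
              h (max (if 1 > t then 1 else t) (1 + k)) 0 (1 + k) hlen'
              le_rfl (by omega) (by omega) (le_max_right _ _)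
              (by intro q hq hhd; cases hq
                  exact absurd (hhead _ (by simpa using hhd)) (by simp))]
          simp only [pvGoB, beq_self_eq_true, if_true,
            show (("Tails":String) == "Heads") = false from rfl, Bool.false_eq_true, if_false]
          have : max t (k + 1) = max (if 1 > t then 1 else t) (1 + k) := by split_ifs <;> omega
          rw [this]
        · have hbx1 : (x == "Heads") = false := by simp [hx]
          have hbx2 : (x == "Tails") = false := by simp [hx2]
          simp only [pvAGo, hcont, Bool.false_eq_true, if_false, hbx1, hbx2]
          rw [if_neg (by omega : ¬ (hc > h)), if_neg (by omega : ¬ (tc > t))]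
          rw [runOther rest x h t hc tc hbx1 hbx2 hhc htc]
          rw [← ih (rest.dropWhile (· == x)) (some x) h t hc tc hlen'
              h0hc hhc h0tc htc
              (by intro q hq hhd; cases hq
                  exact absurd (hhead _ (by simpa using hhd)) (by simp))]
          simp only [pvGoB, hbx1, hbx2, Bool.false_eq_true, if_false]


theorem pvLoopA_eq (l : List String) : pvLoopA l = pvGoB l 0 0 := by
  have hb := bridgeA l [] 0 0 0 0
  simp only [List.length_nil, Nat.cast_zero, zero_add, List.nil_append, List.getLast?_nil] at hb
  have hm := mainEq l.length l none 0 0 0 0 le_rfl le_rfl le_rfl le_rfl le_rfl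
    (fun q hq => by cases hq)
  unfold pvLoopA
  simp only [PySem.List.len_eq]
  rw [hm, ← hb]

-- ===== VERDICT (by name: the statement is the Claim_ definition above) =====
theorem getMaxStreaks_spec : Claim_equal_getMaxStreaks := by
  unfold Claim_equal_getMaxStreaks
  intro toss _
  unfold Spec_getMaxStreaks
  cases toss with
  | none => rfl
  | some l =>
    show getMaxStreaks (some l) = pvGoB l 0 0
    unfold getMaxStreaks
    by_cases h1 : l.length = 1
    · obtain ⟨x, rfl⟩ : ∃ x, l = [x] := by
        cases l with
        | nil => simp at h1
        | cons a as =>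
          cases as with
          | nil => exact ⟨a, rfl⟩
          | cons b bs => simp at h1
      simp only [List.length_cons, List.length_nil, PySem.List.pyGet?_zero_cons]
      by_cases hx : x = "Heads"
      · subst hx; simp [pvGoB]
      · by_cases hx2 : x = "Tails"
        · subst hx2; simp [pvGoB]
        · simp [hx, hx2, pvLoopA_eq]
    · simp [h1, pvLoopA_eq]
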